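-- pv_equiv track=rewrite | github.com/shiningsunnyday/PT-BPE | foldingdiff/angles_and_coords.py | is_valid_atom_array
-- ===== SOURCE A (Python) =====
-- def is_valid_atom_array(lst):
--     if len(lst) % 3 != 0:
--         return False
--     # if lst[0] < 0: # negative residue idx
--     #     return False
--     for i in range(len(lst) // 3):
--         if not (lst[i*3] == lst[i*3+1] == lst[i*3+2]):
--             return False
--         if not (i == 0 or lst[i*3] > lst[(i-1)*3]):
--             return False
--     return True
-- ===== SOURCE B (Python) =====
-- def is_valid_atom_array(lst):
--     # Alternative decomposition: build the 3-element groups once, then run two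
--     # separate shaped passes (per-group equality; strict increase of group reps).
--     if len(lst) % 3 != 0:
--         return False
--     groups = [lst[i:i+3] for i in range(0, len(lst), 3)]
--     reps = [g[0] for g in groups]
--     return all(g[0] == g[1] == g[2] for g in groups) and all(
--         a < b for a, b in zip(reps, reps[1:]))
-- ===== Notes on version B (the rewrite author's own statement) =====
-- stated objective: alternative
-- what changed: Replaces A's single fused index loop (with back-reference lst[(i-1)*3] and early returns) by table-building (slice the list into 3-groups) plus two separate passes: an equality check per group and a strict-increase check over adjacent group representatives via zip.
import Mathlib
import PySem

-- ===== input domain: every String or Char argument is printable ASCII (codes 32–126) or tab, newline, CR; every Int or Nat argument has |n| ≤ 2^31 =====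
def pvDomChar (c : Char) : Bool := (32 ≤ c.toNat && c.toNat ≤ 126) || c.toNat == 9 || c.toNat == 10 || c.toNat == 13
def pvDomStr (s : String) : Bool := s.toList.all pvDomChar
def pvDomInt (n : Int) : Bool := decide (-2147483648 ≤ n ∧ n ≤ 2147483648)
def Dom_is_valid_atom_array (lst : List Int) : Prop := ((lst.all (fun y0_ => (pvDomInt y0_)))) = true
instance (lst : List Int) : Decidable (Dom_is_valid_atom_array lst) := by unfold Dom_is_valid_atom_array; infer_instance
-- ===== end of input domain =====

-- B rebuilds the check as group-table construction (3-element slices) plus two separate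
-- passes, instead of A's fused index loop; equal on all inputs (objective: alternative).

-- ===== PORT A =====
-- A's 'for i in range(len(lst)//3)' with early returns, as recursion over i.
-- All indices Python touches are in range (length % 3 == 0 and i < len//3, and the
-- (i-1)*3 access is short-circuited away for i == 0), so Python never raises here and
-- pyGetD's default value never influences the result.
def avLoop (lst : List Int) (n : Nat) (i : Nat) : Bool :=
  if _h : i < n then
    if !(PySem.List.pyGetD lst ((i : Int) * 3) 0 == PySem.List.pyGetD lst ((i : Int) * 3 + 1) 0
         && PySem.List.pyGetD lst ((i : Int) * 3 + 1) 0 == PySem.List.pyGetD lst ((i : Int) * 3 + 2) 0) then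
      false
    else if !((i == 0) || decide (PySem.List.pyGetD lst ((i : Int) * 3) 0 > PySem.List.pyGetD lst (((i : Int) - 1) * 3) 0)) then
      false
    else avLoop lst n (i + 1)
  else true
termination_by n - i

def is_valid_atom_array (lst : List Int) : Bool :=
  if PySem.Int.mod (lst.length : Int) 3 != 0 then false
  else avLoop lst (PySem.Int.floordiv (lst.length : Int) 3).toNat 0

-- ===== PORT B =====
-- groups = [lst[i:i+3] for i in range(0, len(lst), 3)]; reps = [g[0] for g in groups];
-- all(g[0] == g[1] == g[2] …) and all(a < b for a, b in zip(reps, reps[1:])).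
-- The g[0]/g[1]/g[2] accesses are on length-3 groups, so pyGetD's default is never used.
def is_valid_atom_array_alt (lst : List Int) : Bool :=
  if PySem.Int.mod (lst.length : Int) 3 != 0 then false
  else
    let groups := (PySem.List.pyRange 0 (lst.length : Int) 3).map
      (fun i => PySem.List.slice lst (some i) (some (i + 3)))
    let reps := groups.map (fun g => PySem.List.pyGetD g 0 0)
    (groups.all (fun g =>
        PySem.List.pyGetD g 0 0 == PySem.List.pyGetD g 1 0
        && PySem.List.pyGetD g 1 0 == PySem.List.pyGetD g 2 0))
      && ((reps.zip (PySem.List.slice reps (some 1) none)).all (fun p => decide (p.1 < p.2)))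

-- ===== PRECONDITION & SPEC =====
def Spec_is_valid_atom_array (lst : List Int) (out : Bool) : Prop := out = is_valid_atom_array_alt lst
instance (lst : List Int) (out : Bool) : Decidable (Spec_is_valid_atom_array lst out) := by unfold Spec_is_valid_atom_array; infer_instance

-- ===== CLAIM (what is proved, stated in full; the proofs are below) =====
def Claim_equal_is_valid_atom_array : Prop := ∀ (lst : List Int), Dom_is_valid_atom_array lst → Spec_is_valid_atom_array lst (is_valid_atom_array lst)

-- ===== LEMMAS AND PROOFS =====

-- Reference predicate both ports are reduced to: walk the list three at a time,
-- carrying the previous group representative.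
def pvS : List Int → Option Int → Bool
  | a :: b :: c :: rest, p =>
      (a == b && b == c)
        && (match p with | none => true | some q => decide (q < a))
        && pvS rest (some a)
  | [], _ => true
  | _, _ => false

-- B's group table, as a named function of the input list.
def groupsOf (lst : List Int) : List (List Int) :=
  (PySem.List.pyRange 0 (lst.length : Int) 3).map
    (fun i => PySem.List.slice lst (some i) (some (i + 3)))

-- B's adjacent-pairs check, with an optional element prepended.
def pvPairs (p : Option Int) (r : List Int) : Bool :=
  let s := match p with | none => r | some x => x :: r
  (s.zip s.tail).all (fun q => decide (q.1 < q.2))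

lemma pvPairs_none_cons (a : Int) (r : List Int) :
    pvPairs none (a :: r) = pvPairs (some a) r := rfl

lemma pvPairs_some_cons (q a : Int) (r : List Int) :
    pvPairs (some q) (a :: r) = (decide (q < a) && pvPairs (some a) r) := by
  simp [pvPairs]

lemma groupsOf_nil : groupsOf [] = [] := by decide

lemma groupsOf_cons (a b c : Int) (rest : List Int) :
    groupsOf (a :: b :: c :: rest) = [a, b, c] :: groupsOf rest := by
  unfold groupsOf
  rw [PySem.List.pyRange_of_pos 0 _ (by norm_num), PySem.List.pyRange_of_pos 0 _ (by norm_num)]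
  have hL : ((a :: b :: c :: rest).length : Int) = (rest.length : Int) + 3 := by
    simp; ring
  rw [hL]
  have hcnt : (if (0:Int) < (rest.length : Int) + 3 then (((rest.length : Int) + 3 - 0 + 3 - 1) / 3).toNat else 0)
      = (if (0:Int) < (rest.length : Int) then (((rest.length : Int) - 0 + 3 - 1) / 3).toNat else 0) + 1 := by
    rcases Nat.eq_zero_or_pos rest.length with h0 | h0
    · simp [h0]
    · have h1 : (0:Int) < (rest.length : Int) := by exact_mod_cast h0
      have h2 : (0:Int) < (rest.length : Int) + 3 := by omega
      simp only [if_pos h1, if_pos h2]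
      have h3 : ((rest.length : Int) + 3 - 0 + 3 - 1) = ((rest.length : Int) - 0 + 3 - 1) + 1 * 3 := by ring
      rw [h3, Int.add_mul_ediv_right _ _ (by norm_num)]
      omega
  rw [hcnt, List.range_succ_eq_map]
  simp only [List.map_cons, List.map_map]
  congr 1
  apply List.map_congr_left
  intro j _
  simp only [Function.comp_apply]
  have e1 : (0:Int) + 3 * (((j:Nat).succ : Nat) : Int) = (((3*j+3 : Nat)) : Int) := by push_cast; ring
  have e2 : (0:Int) + 3 * ((j:Nat) : Int) = (((3*j : Nat)) : Int) := by push_cast; ring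
  rw [e1, e2]
  rw [show (((3*j+3 : Nat)) : Int) + 3 = (((3*j+3 : Nat)) : Int) + ((3:Nat):Int) by norm_num,
      PySem.List.slice_natCast_add,
      show (((3*j : Nat)) : Int) + 3 = (((3*j : Nat)) : Int) + ((3:Nat):Int) by norm_num,
      PySem.List.slice_natCast_add]
  have hd : List.drop (3*j+3) (a :: b :: c :: rest) = List.drop (3*j) rest := by
    rw [show 3*j+3 = 3+3*j by ring, ← List.drop_drop]
    rfl
  rw [hd]

lemma drop3 (lst : List Int) (m : Nat) (h : m + 3 ≤ lst.length) :
    lst.drop m = lst.getD m 0 :: lst.getD (m+1) 0 :: lst.getD (m+2) 0 :: lst.drop (m+3) := by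
  rw [List.drop_eq_getElem_cons (by omega), List.drop_eq_getElem_cons (by omega),
      List.drop_eq_getElem_cons (by omega)]
  rw [List.getD_eq_getElem _ _ (by omega : m < lst.length),
      List.getD_eq_getElem _ _ (by omega : m+1 < lst.length),
      List.getD_eq_getElem _ _ (by omega : m+2 < lst.length)]

-- B's two passes over the group table compute exactly the fused walk pvS.
lemma L_B : ∀ (k : Nat) (lst : List Int) (p : Option Int), lst.length = 3 * k →
    pvS lst p = (((groupsOf lst).all (fun g =>
        PySem.List.pyGetD g 0 0 == PySem.List.pyGetD g 1 0
        && PySem.List.pyGetD g 1 0 == PySem.List.pyGetD g 2 0))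
      && pvPairs p ((groupsOf lst).map (fun g => PySem.List.pyGetD g 0 0))) := by
  intro k
  induction k with
  | zero =>
    intro lst p hlen
    have h0 : lst = [] := List.eq_nil_of_length_eq_zero (by omega)
    subst h0
    rw [groupsOf_nil]
    cases p <;> simp [pvS, pvPairs]
  | succ k ih =>
    intro lst p hlen
    rcases lst with _ | ⟨a, _ | ⟨b, _ | ⟨c, rest⟩⟩⟩
    · exfalso; simp at hlen
    · exfalso; simp at hlen; omega
    · exfalso; simp at hlen; omega
    have hr : rest.length = 3 * k := by simp at hlen; omega
    rw [groupsOf_cons]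
    simp only [pvS, List.all_cons, List.map_cons]
    rw [ih rest (some a) hr]
    have hg0 : PySem.List.pyGetD ([a,b,c] : List Int) 0 0 = a := by
      simp [PySem.List.pyGetD, PySem.List.pyGet?, PySem.List.pyIdx?]
    have hg1 : PySem.List.pyGetD ([a,b,c] : List Int) 1 0 = b := by
      simp [PySem.List.pyGetD, PySem.List.pyGet?, PySem.List.pyIdx?]
    have hg2 : PySem.List.pyGetD ([a,b,c] : List Int) 2 0 = c := by
      simp [PySem.List.pyGetD, PySem.List.pyGet?, PySem.List.pyIdx?]
    rw [hg0, hg1, hg2]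
    cases p with
    | none =>
      rw [pvPairs_none_cons]
      cases h1 : (a == b) <;> cases h2 : (b == c) <;>
        cases h3 : (groupsOf rest).all (fun g =>
          PySem.List.pyGetD g 0 0 == PySem.List.pyGetD g 1 0
          && PySem.List.pyGetD g 1 0 == PySem.List.pyGetD g 2 0) <;>
        cases h4 : pvPairs (some a) (List.map (fun g => PySem.List.pyGetD g 0 0) (groupsOf rest)) <;>
        simp
    | some q =>
      rw [pvPairs_some_cons]
      cases h1 : (a == b) <;> cases h2 : (b == c) <;>
        cases h3 : (groupsOf rest).all (fun g =>
          PySem.List.pyGetD g 0 0 == PySem.List.pyGetD g 1 0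
          && PySem.List.pyGetD g 1 0 == PySem.List.pyGetD g 2 0) <;>
        cases h4 : pvPairs (some a) (List.map (fun g => PySem.List.pyGetD g 0 0) (groupsOf rest)) <;>
        cases h5 : decide (q < a) <;>
        simp [h5]

-- A's index loop from position i computes pvS of the corresponding suffix.
lemma L_A (lst : List Int) (k : Nat) (hlen : lst.length = 3 * k) :
    ∀ j i, k - i ≤ j → i ≤ k →
    avLoop lst k i = pvS (lst.drop (3 * i))
      (match i with | 0 => none | Nat.succ i' => some (lst.getD (3 * i') 0)) := by
  intro j
  induction j with
  | zero =>
    intro i hj hik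
    have hik' : i = k := by omega
    subst hik'
    rw [avLoop, dif_neg (by omega), List.drop_eq_nil_of_le (by omega)]
    cases i <;> rfl
  | succ j ihj =>
    intro i hj hik
    by_cases hlt : i < k
    case neg =>
      have hik' : i = k := by omega
      subst hik'
      rw [avLoop, dif_neg (by omega), List.drop_eq_nil_of_le (by omega)]
      cases i <;> rfl
    case pos =>
      rw [avLoop, dif_pos hlt]
      have e0 : ((i : Int) * 3) = (((3 * i : Nat)) : Int) := by push_cast; ring
      have e1 : ((i : Int) * 3 + 1) = (((3 * i + 1 : Nat)) : Int) := by push_cast; ring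
      have e2 : ((i : Int) * 3 + 2) = (((3 * i + 2 : Nat)) : Int) := by push_cast; ring
      rw [e2, e1, e0, PySem.List.pyGetD_natCast, PySem.List.pyGetD_natCast, PySem.List.pyGetD_natCast]
      rw [drop3 lst (3 * i) (by omega)]
      simp only [pvS]
      rw [ihj (i + 1) (by omega) (by omega)]
      rw [show 3 * (i + 1) = 3 * i + 3 from by ring]
      cases i with
      | zero =>
        simp only [Nat.mul_zero]
        have h00 : ((0 : Nat) == 0) = true := rfl
        rw [h00]
        simp only [Bool.true_or, Bool.not_true]
        cases h1 : (lst.getD (3*0) 0 == lst.getD (3*0+1) 0 && (lst.getD (3*0+1) 0 == lst.getD (3*0+2) 0)) <;>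
          simp
      | succ i' =>
        have hbeq : ((Nat.succ i') == 0) = false := rfl
        rw [hbeq]
        have e3 : (((Nat.succ i' : Nat) : Int) - 1) * 3 = (((3 * i' : Nat)) : Int) := by push_cast; ring
        rw [e3, PySem.List.pyGetD_natCast]
        simp only [Bool.false_or]
        cases h1 : (lst.getD (3*(Nat.succ i')) 0 == lst.getD (3*(Nat.succ i')+1) 0 &&
            (lst.getD (3*(Nat.succ i')+1) 0 == lst.getD (3*(Nat.succ i')+2) 0)) <;>
          cases h2 : decide (lst.getD (3*i') 0 < lst.getD (3*(Nat.succ i')) 0) <;>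
            simp

theorem pv_main (lst : List Int) : is_valid_atom_array lst = is_valid_atom_array_alt lst := by
  unfold is_valid_atom_array is_valid_atom_array_alt
  by_cases hm : (3:Int) ∣ (lst.length : Int)
  case neg =>
    have hg : (PySem.Int.mod (lst.length : Int) 3 != 0) = true := by
      simp [bne, hm]
    rw [hg]
    rfl
  case pos =>
    have hg : (PySem.Int.mod (lst.length : Int) 3 != 0) = false := by
      simp [bne, hm]
    rw [hg]
    simp only [if_false, Bool.false_eq_true]
    have hdvd' : 3 ∣ lst.length := by exact_mod_cast hm
    obtain ⟨k, hk⟩ := hdvd'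
    have hA : (PySem.Int.floordiv (lst.length : Int) 3).toNat = k := by
      rw [PySem.Int.floordiv_eq_ediv_of_pos (by norm_num)]
      omega
    rw [hA, L_A lst k hk k 0 (by omega) (by omega)]
    simp only [Nat.mul_zero, List.drop_zero]
    rw [L_B k lst none hk]
    unfold groupsOf
    rw [PySem.List.slice_from_one]
    rfl

-- ===== VERDICT (by name: the statement is the Claim_ definition above) =====
theorem is_valid_atom_array_spec : Claim_equal_is_valid_atom_array := by
  intro lst _
  unfold Spec_is_valid_atom_array
  exact pv_main lst
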